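-- pv_equiv track=rewrite | github.com/AndyWilliams0n/Assist-Git-App | app/agents_jira_api/runtime.py | _build_structured_description
-- ===== SOURCE A (Python) =====
-- DESCRIPTION_SECTION_TITLES = (
--     "User Story",
--     "Requirements",
--     "Acceptance Criteria",
--     "Agent Context",
--     "Agent Prompt",
-- )
--
-- def _build_structured_description(user_message: str, summary: str) -> str:
--     clean_summary = str(summary or "Ticket request").strip() or "Ticket request"
--     section_content = {
--         "User Story": f"As a team member, I need {clean_summary} so that the requested work is completed.",
--         "Requirements": f"Implement work described by the ticket summary: {clean_summary}.",
--         "Acceptance Criteria": "Requested behavior is implemented and verifiable in the target environment.",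
--         "Agent Context": "Generated by Jira REST API Agent in AI-Multi-Agent-Assistant.",
--         "Agent Prompt": "",
--     }
--     lines: list[str] = []
--     for title in DESCRIPTION_SECTION_TITLES:
--         lines.append(f"## {title}")
--         lines.append(str(section_content.get(title) or "").strip())
--         lines.append("")
--     return "\n".join(lines).strip()
-- ===== SOURCE B (Python) =====
-- def _build_structured_description(user_message: str, summary: str) -> str:
--     clean_summary = str(summary or "Ticket request").strip() or "Ticket request"
--     return (
--         "## User Story\n"
--         f"As a team member, I need {clean_summary} so that the requested work is completed.\n"
--         "\n"
--         "## Requirements\n"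
--         f"Implement work described by the ticket summary: {clean_summary}.\n"
--         "\n"
--         "## Acceptance Criteria\n"
--         "Requested behavior is implemented and verifiable in the target environment.\n"
--         "\n"
--         "## Agent Context\n"
--         "Generated by Jira REST API Agent in AI-Multi-Agent-Assistant.\n"
--         "\n"
--         "## Agent Prompt"
--     )
-- ===== Notes on version B (the rewrite author's own statement) =====
-- stated objective: simpler
-- what changed: B drops the titles tuple, the per-section dict and the append/join/strip accumulation loop, returning one literal template string with the clean summary interpolated twice (same fallback chain).
import Mathlib
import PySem

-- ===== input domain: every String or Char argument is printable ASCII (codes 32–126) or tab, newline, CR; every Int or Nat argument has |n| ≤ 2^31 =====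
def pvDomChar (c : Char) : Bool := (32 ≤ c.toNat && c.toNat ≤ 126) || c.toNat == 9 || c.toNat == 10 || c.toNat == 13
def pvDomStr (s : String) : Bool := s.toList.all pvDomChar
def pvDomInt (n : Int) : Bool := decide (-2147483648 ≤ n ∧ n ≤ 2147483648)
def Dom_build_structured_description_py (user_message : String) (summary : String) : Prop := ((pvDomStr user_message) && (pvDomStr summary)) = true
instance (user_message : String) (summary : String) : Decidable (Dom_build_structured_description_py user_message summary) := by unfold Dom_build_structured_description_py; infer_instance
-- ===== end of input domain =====

set_option maxRecDepth 4000


-- B replaces A's titles tuple, per-section dict and accumulation loop by one literal template string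
-- (same clean_summary fallback); objective: simpler. A ignores user_message; no argument is mutated.

-- ===== PORT A =====
def DESCRIPTION_SECTION_TITLES : List String :=
  ["User Story", "Requirements", "Acceptance Criteria", "Agent Context", "Agent Prompt"]

def build_structured_description_py (user_message : String) (summary : String) : String :=
  let clean0 := PySem.Str.strip (if summary = "" then "Ticket request" else summary)
  let clean_summary := if clean0 = "" then "Ticket request" else clean0
  let section_content : PySem.Dict String String :=
    (((((PySem.Dict.empty.insert "User Story"
        ("As a team member, I need " ++ clean_summary ++ " so that the requested work is completed.")).insert
        "Requirements" ("Implement work described by the ticket summary: " ++ clean_summary ++ ".")).insert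
        "Acceptance Criteria" "Requested behavior is implemented and verifiable in the target environment.").insert
        "Agent Context" "Generated by Jira REST API Agent in AI-Multi-Agent-Assistant.").insert
        "Agent Prompt" "")
  let lines : List String := DESCRIPTION_SECTION_TITLES.foldl (fun acc title =>
      (acc ++ ["## " ++ title]) ++ [PySem.Str.strip ((section_content.get? title).getD "")] ++ [""]) []
  PySem.Str.strip (PySem.Str.join "\n" lines)

def build_structured_description_py_alt (user_message : String) (summary : String) : String :=
  let clean_summary :=
    let c := PySem.Str.strip (if summary = "" then "Ticket request" else summary)
    if c = "" then "Ticket request" else c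
  "## User Story\nAs a team member, I need " ++ clean_summary ++
  " so that the requested work is completed.\n\n## Requirements\nImplement work described by the ticket summary: " ++
  clean_summary ++
  ".\n\n## Acceptance Criteria\nRequested behavior is implemented and verifiable in the target environment.\n\n## Agent Context\nGenerated by Jira REST API Agent in AI-Multi-Agent-Assistant.\n\n## Agent Prompt"



-- ===== PRECONDITION & SPEC =====
def Spec_build_structured_description_py (user_message : String) (summary : String) (out : String) : Prop := out = build_structured_description_py_alt user_message summary
instance (user_message : String) (summary : String) (out : String) : Decidable (Spec_build_structured_description_py user_message summary out) := by unfold Spec_build_structured_description_py; infer_instance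

-- ===== CLAIM (what is proved, stated in full; the proofs are below) =====
def Claim_equal_build_structured_description_py : Prop := ∀ (user_message : String) (summary : String), Dom_build_structured_description_py user_message summary → Spec_build_structured_description_py user_message summary (build_structured_description_py user_message summary)

-- ===== LEMMAS AND PROOFS =====
lemma lstrip_append_of {l1 l2 : List Char} (h : PySem.Chars.lstrip l1 ≠ []) :
    PySem.Chars.lstrip (l1 ++ l2) = PySem.Chars.lstrip l1 ++ l2 := by
  have hne : (List.dropWhile PySem.Chars.isspace l1).isEmpty = false := by
    simpa [PySem.Chars.lstrip, List.isEmpty_iff] using h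
  simp [PySem.Chars.lstrip, List.dropWhile_append, hne]

lemma rstrip_append_of {l1 l2 : List Char} (h : PySem.Chars.rstrip l2 ≠ []) :
    PySem.Chars.rstrip (l1 ++ l2) = l1 ++ PySem.Chars.rstrip l2 := by
  have hne : (List.dropWhile PySem.Chars.isspace l2.reverse).isEmpty = false := by
    simpa [PySem.Chars.rstrip, List.isEmpty_iff] using h
  simp [PySem.Chars.rstrip, List.reverse_append, List.dropWhile_append, hne]

lemma strip_sandwich {l1 l3 : List Char} (l2 : List Char)
    (h1 : PySem.Chars.lstrip l1 = l1) (h1' : l1 ≠ [])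
    (h3 : PySem.Chars.rstrip l3 ≠ []) :
    PySem.Chars.strip (l1 ++ l2 ++ l3) = l1 ++ l2 ++ PySem.Chars.rstrip l3 := by
  have hl : PySem.Chars.lstrip l1 ≠ [] := by rw [h1]; exact h1'
  simp only [PySem.Chars.strip, List.append_assoc, lstrip_append_of hl, h1]
  rw [← List.append_assoc, rstrip_append_of h3, List.append_assoc]

-- the single equivalence computation: A's strip/join/dict pipeline collapses to B's template
lemma build_eq (user_message summary : String) :
    build_structured_description_py user_message summary = build_structured_description_py_alt user_message summary := by
  simp only [build_structured_description_py, build_structured_description_py_alt]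
  set cs := (if PySem.Str.strip (if summary = "" then "Ticket request" else summary) = "" then "Ticket request"
             else PySem.Str.strip (if summary = "" then "Ticket request" else summary)) with hcs
  clear_value cs
  simp [DESCRIPTION_SECTION_TITLES, PySem.Dict.get?, PySem.Dict.insert, PySem.Dict.contains,
        PySem.Dict.empty, List.foldl]

  rw [← String.toList_inj]
  simp only [PySem.Str.toList_strip, PySem.Str.toList_join, String.toList_append,
    List.map, PySem.Chars.join, List.intercalate, List.intersperse, List.flatten]
  rw [strip_sandwich (cs.toList) (by decide) (by decide) (by decide),
      strip_sandwich (cs.toList) (by decide) (by decide) (by decide)]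
  rw [show PySem.Chars.rstrip " so that the requested work is completed.".toList = " so that the requested work is completed.".toList from by decide,
      show PySem.Chars.rstrip ".".toList = ".".toList from by decide,
      show PySem.Chars.strip "Requested behavior is implemented and verifiable in the target environment.".toList = "Requested behavior is implemented and verifiable in the target environment.".toList from by decide,
      show PySem.Chars.strip "Generated by Jira REST API Agent in AI-Multi-Agent-Assistant.".toList = "Generated by Jira REST API Agent in AI-Multi-Agent-Assistant.".toList from by decide,
      show PySem.Chars.strip "".toList = [] from by decide]
  simp only [List.append_assoc, List.append_eq]
  have step1 : ∀ X : List Char, X = "## User Story".toList ++ ("\n".toList ++ ("As a team member, I need ".toList ++ (cs.toList ++ (" so that the requested work is completed.".toList ++ ("\n".toList ++ ("".toList ++ ("\n".toList ++ ("## Requirements".toList ++ ("\n".toList ++ ("Implement work described by the ticket summary: ".toList ++ cs.toList)))))))))) ++ (".".toList ++ ("\n".toList ++ ("".toList ++ ("\n".toList ++ ("## Acceptance Criteria".toList ++ ("\n".toList ++ ("Requested behavior is implemented and verifiable in the target environment.".toList ++ ("\n".toList ++ ("".toList ++ ("\n".toList ++ ("## Agent Context".toList ++ ("\n".toList ++ ("Generated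 by Jira REST API Agent in AI-Multi-Agent-Assistant.".toList ++ ("\n".toList ++ ("".toList ++ ("\n".toList ++ ("## Agent Prompt".toList ++ ("\n".toList ++ (([] : List Char) ++ ("\n".toList ++ ("".toList ++ ([] : List Char)))))))))))))))))))))) →
      PySem.Chars.strip X = "## User Story".toList ++ ("\n".toList ++ ("As a team member, I need ".toList ++ (cs.toList ++ (" so that the requested work is completed.".toList ++ ("\n".toList ++ ("".toList ++ ("\n".toList ++ ("## Requirements".toList ++ ("\n".toList ++ ("Implement work described by the ticket summary: ".toList ++ cs.toList)))))))))) ++ PySem.Chars.rstrip (".".toList ++ ("\n".toList ++ ("".toList ++ ("\n".toList ++ ("## Acceptance Criteria".toList ++ ("\n".toList ++ ("Requested behavior is implemented and verifiable in the target environment.".toList ++ ("\n".toList ++ ("".toList ++ ("\n".toList ++ ("## Agent Context".toList ++ ("\n".toList ++ ("Generated by Jira REST API Agent in AI-Multi-Agent-Assistant.".toList ++ ("\n".toList ++ ("".toList ++ ("\n".toList ++ ("## Agent Prompt".toList ++ ("\n".toList ++ (([] : List Char) ++ ("\n".toList ++ ("".toList ++ ([] : List Char)))))))))))))))))))))) :=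 by
    intro X hX; rw [hX]; exact strip_sandwich _ (by decide) (by decide) (by decide)
  rw [step1 _ (by simp only [List.append_assoc])]
  rw [show PySem.Chars.rstrip (".".toList ++ ("\n".toList ++ ("".toList ++ ("\n".toList ++ ("## Acceptance Criteria".toList ++ ("\n".toList ++ ("Requested behavior is implemented and verifiable in the target environment.".toList ++ ("\n".toList ++ ("".toList ++ ("\n".toList ++ ("## Agent Context".toList ++ ("\n".toList ++ ("Generated by Jira REST API Agent in AI-Multi-Agent-Assistant.".toList ++ ("\n".toList ++ ("".toList ++ ("\n".toList ++ ("## Agent Prompt".toList ++ ("\n".toList ++ (([] : List Char) ++ ("\n".toList ++ ("".toList ++ ([] : List Char)))))))))))))))))))))) = ".\n\n## Acceptance Criteria\nRequested behavior is implemented and verifiable in the target environment.\n\n## Agent Context\nGenerated by Jira REST API Agent in AI-Multi-Agent-Assistant.\n\n## Agent Prompt".toList from by decide]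
  rw [show ("## User Story\nAs a team member, I need ".toList : List Char) = "## User Story".toList ++ ("\n".toList ++ "As a team member, I need ".toList) from by decide]
  rw [show (" so that the requested work is completed.\n\n## Requirements\nImplement work described by the ticket summary: ".toList : List Char) = " so that the requested work is completed.".toList ++ ("\n".toList ++ ("".toList ++ ("\n".toList ++ ("## Requirements".toList ++ ("\n".toList ++ "Implement work described by the ticket summary: ".toList))))) from by decide]
  simp only [List.append_assoc]


-- ===== VERDICT (by name: the statement is the Claim_ definition above) =====
theorem build_structured_description_py_spec : Claim_equal_build_structured_description_py := by
  intro user_message summary _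
  unfold Spec_build_structured_description_py
  exact build_eq user_message summary
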